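-- pv_equiv track=rewrite | github.com/gsBatra/NaiveBayesClassifier | NaiveBayesClassifier.py | categorical_separate_class_training
-- ===== SOURCE A (Python) =====
-- def categorical_separate_class_training(training_data):
--     class_data = dict()
--     for i in range(len(training_data)):
--         for k in range(len(training_data[0]) - 1):
--             if k not in class_data:
--                 class_data[k] = list()
--             class_data[k].append((training_data[i][k], training_data[i][-1]))
--     return class_data
-- ===== SOURCE B (Python) =====
-- def categorical_separate_class_training(training_data):
--     ncols = len(training_data[0]) - 1 if training_data else 0
--     if ncols <= 0:
--         return {}
--
--     def build(rows):
--         # recursion over the rows, building each column back-to-front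
--         if not rows:
--             return [[] for _ in range(ncols)]
--         first, rest = rows[0], rows[1:]
--         cols = build(rest)
--         lab = first[-1]
--         return [[(v, lab)] + c for v, c in zip(first[:ncols], cols)]
--
--     return dict(enumerate(build(training_data)))
-- ===== Notes on version B (the rewrite author's own statement) =====
-- stated objective: alternative
-- what changed: Replaces A's iterative row-major dict-append loop by a structural recursion over the rows that builds each feature column back-to-front (prepending each row's (value,label) pair onto the columns of the recursive result) and finally wraps the column list with dict(enumerate(...)).
import Mathlib
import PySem

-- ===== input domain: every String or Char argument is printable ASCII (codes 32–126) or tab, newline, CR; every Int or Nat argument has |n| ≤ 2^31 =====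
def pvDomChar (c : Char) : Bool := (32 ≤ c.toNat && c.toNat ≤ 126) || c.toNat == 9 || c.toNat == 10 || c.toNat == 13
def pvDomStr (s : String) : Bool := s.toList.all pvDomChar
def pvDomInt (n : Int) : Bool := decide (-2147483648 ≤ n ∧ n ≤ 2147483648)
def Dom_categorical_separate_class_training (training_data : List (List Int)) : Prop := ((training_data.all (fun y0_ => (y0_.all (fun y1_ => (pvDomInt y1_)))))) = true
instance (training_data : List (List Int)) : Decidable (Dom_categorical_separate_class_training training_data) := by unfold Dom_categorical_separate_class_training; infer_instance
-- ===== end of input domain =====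

-- B replaces A's iterative row-major dict-append double loop by a structural recursion over the
-- rows, building each feature column back-to-front (prepend-and-merge), then dict(enumerate(...)).


-- ===== PORT A =====
def categorical_separate_class_training (training_data : List (List Int)) : List (Int × List (Int × Int)) :=
  ((PySem.List.pyRange 0 (training_data.length : Int) 1).foldl
    (fun class_data i =>
      (PySem.List.pyRange 0 (((PySem.List.pyGetD training_data 0 []).length : Int) - 1) 1).foldl
        (fun class_data k =>
          let class_data := if class_data.contains k then class_data else class_data.insert k []
          class_data.modify k []
            (fun l => l ++ [(PySem.List.pyGetD (PySem.List.pyGetD training_data i []) k 0,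
                             PySem.List.pyGetD (PySem.List.pyGetD training_data i []) (-1) 0)]))
        class_data)
    PySem.Dict.empty).items

-- ===== PORT B =====
-- build(rows): recursion over the rows, each column built back-to-front
def pvBuild (ncols : Int) : List (List Int) → List (List (Int × Int))
  | [] => (PySem.List.pyRange 0 ncols 1).map (fun _ => ([] : List (Int × Int)))
  | first :: rest =>
      let cols := pvBuild ncols rest
      let lab := PySem.List.pyGetD first (-1) 0
      ((PySem.List.slice first none (some ncols)).zip cols).map (fun p => (p.1, lab) :: p.2)

def categorical_separate_class_training_alt (training_data : List (List Int)) : List (Int × List (Int × Int)) :=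
  let ncols : Int := match training_data with
    | [] => 0
    | f :: _ => (f.length : Int) - 1
  if ncols ≤ 0 then []
  else (PySem.Dict.ofList (PySem.List.enumerate (pvBuild ncols training_data))).items

-- ===== PRECONDITION & SPEC =====
-- Pre_ excludes exactly the inputs where Python A raises IndexError: some row shorter than
-- len(training_data[0]) - 1 (which also forces every row nonempty when that bound is positive).
def Pre_categorical_separate_class_training (training_data : List (List Int)) : Prop :=
  ∀ row ∈ training_data, (training_data.headD []).length - 1 ≤ row.length
instance (training_data : List (List Int)) : Decidable (Pre_categorical_separate_class_training training_data) := by unfold Pre_categorical_separate_class_training; infer_instance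
def pvWitness_categorical_separate_class_training : List (List Int) := [[1, 2, 0], [3, 4, 1]]

def Spec_categorical_separate_class_training (training_data : List (List Int)) (out : List (Int × List (Int × Int))) : Prop := out = categorical_separate_class_training_alt training_data
instance (training_data : List (List Int)) (out : List (Int × List (Int × Int))) : Decidable (Spec_categorical_separate_class_training training_data out) := by unfold Spec_categorical_separate_class_training; infer_instance

-- ===== CLAIM (what is proved, stated in full; the proofs are below) =====
def Claim_equal_categorical_separate_class_training : Prop := ∀ (training_data : List (List Int)), Dom_categorical_separate_class_training training_data → Pre_categorical_separate_class_training training_data → Spec_categorical_separate_class_training training_data (categorical_separate_class_training training_data)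

-- ===== LEMMAS AND PROOFS =====

def pvColVal (row : List Int) (k : Int) : Int × Int :=
  (PySem.List.pyGetD row k 0, PySem.List.pyGetD row (-1) 0)

def pvStep (row : List Int) (class_data : PySem.Dict Int (List (Int × Int))) (k : Int) :
    PySem.Dict Int (List (Int × Int)) :=
  (if class_data.contains k then class_data else class_data.insert k []).modify k []
    (fun l => l ++ [pvColVal row k])

theorem pvNodupKeys (M : Nat) (g : Nat → List (Int × Int)) :
    (PySem.Dict.mk ((List.range M).map (fun (k : Nat) => ((k : Int), g k)))).keys.Nodup := by
  simp only [PySem.Dict.keys, List.map_map]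
  refine List.Nodup.map ?_ (List.nodup_range)
  intro a b h
  simpa using h

theorem pvNodupKeysApp (n : Nat) (g : Nat → List (Int × Int)) (w : List (Int × Int)) :
    (PySem.Dict.mk (((List.range n).map (fun (k : Nat) => ((k : Int), g k))) ++ [((n : Int), w)])).keys.Nodup := by
  simp only [PySem.Dict.keys, List.map_append, List.map_map]
  rw [List.nodup_append]
  refine ⟨List.Nodup.map ?_ List.nodup_range, by simp, ?_⟩
  · intro a b h; simpa using h
  · intro a ha b hb
    simp at ha hb
    obtain ⟨k, hk, hak⟩ := ha
    subst hb
    intro h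
    omega

theorem pvStep_fresh (row : List Int) (n : Nat) :
    (PySem.List.pyRange 0 (n : Int) 1).foldl (pvStep row) PySem.Dict.empty
      = PySem.Dict.mk ((List.range n).map (fun (k : Nat) => ((k : Int), [pvColVal row k]))) := by
  induction n with
  | zero => rfl
  | succ n ih =>
    have hsplit := PySem.List.pyRange_one_succ_right (a := 0) (b := (n : Int)) (by omega)
    push_cast
    rw [hsplit, List.foldl_append, ih]
    simp only [List.foldl_cons, List.foldl_nil]
    set L := (List.range n).map (fun (k : Nat) => ((k : Int), [pvColVal row k])) with hL
    have hcont : (PySem.Dict.mk L).contains (n : Int) = false := by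
      simp only [PySem.Dict.contains, hL]
      simp
      intro k hk
      omega
    have hins : (PySem.Dict.mk L).insert (n : Int) ([] : List (Int × Int))
        = PySem.Dict.mk (L ++ [((n : Int), [])]) := by
      simp [PySem.Dict.insert, hcont]
    have hmem : (((n : Int), ([] : List (Int × Int))) ∈ L ++ [((n : Int), [])]) := by simp
    have hget := PySem.Dict.getD_of_mem_items _ hmem (pvNodupKeysApp n _ []) []
    have hcont2 : (PySem.Dict.mk (L ++ [((n : Int), [])])).contains (n : Int) = true := by
      simp only [PySem.Dict.contains, List.any_eq_true]
      exact ⟨((n : Int), []), hmem, by simp⟩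
    rw [pvStep, hcont]
    simp only [Bool.false_eq_true, if_false]
    rw [hins, PySem.Dict.modify, hget, PySem.Dict.insert, hcont2, if_pos rfl]
    congr 1
    rw [List.range_succ, List.map_append, List.map_append]
    congr 1
    · rw [hL, List.map_map]
      apply List.map_congr_left
      intro k hk
      simp only [List.mem_range] at hk
      have hne : (((k : Int), [pvColVal row (k : Int)]).1 == (n : Int)) = false := by
        simp only [beq_eq_false_iff_ne, ne_eq]
        simp only [Int.natCast_inj]
        omega
      simp [Function.comp, hne]
    · simp

theorem pvStep_append (row : List Int) (M : Nat) (g : Nat → List (Int × Int)) (n : Nat)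
    (hn : n ≤ M) :
    (PySem.List.pyRange 0 (n : Int) 1).foldl (pvStep row)
        (PySem.Dict.mk ((List.range M).map (fun (k : Nat) => ((k : Int), g k))))
      = PySem.Dict.mk ((List.range M).map
          (fun (k : Nat) => ((k : Int), if k < n then g k ++ [pvColVal row k] else g k))) := by
  induction n with
  | zero => rfl
  | succ n ih =>
    have hnM : n ≤ M := by omega
    have hnlt : n < M := by omega
    have hsplit := PySem.List.pyRange_one_succ_right (a := 0) (b := (n : Int)) (by omega)
    push_cast
    rw [hsplit, List.foldl_append, ih hnM]
    simp only [List.foldl_cons, List.foldl_nil]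
    set L := (List.range M).map (fun (k : Nat) => ((k : Int), if k < n then g k ++ [pvColVal row (k : Int)] else g k)) with hL
    have hmem : (((n : Int), g n) ∈ L) := by
      rw [hL]
      refine List.mem_map.mpr ⟨n, by simp [List.mem_range]; omega, by simp⟩
    have hcont : (PySem.Dict.mk L).contains (n : Int) = true := by
      simp only [PySem.Dict.contains, List.any_eq_true]
      exact ⟨((n : Int), g n), hmem, by simp⟩
    have hnodup : (PySem.Dict.mk L).keys.Nodup := by
      rw [hL]; exact pvNodupKeys M _
    have hget := PySem.Dict.getD_of_mem_items _ hmem hnodup []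
    rw [pvStep, if_pos hcont, PySem.Dict.modify]
    rw [← hL] at hget
    rw [hget, PySem.Dict.insert, if_pos hcont]
    congr 1
    rw [hL, List.map_map]
    apply List.map_congr_left
    intro k hk
    simp only [List.mem_range] at hk
    by_cases hkn : k = n
    · subst hkn
      simp
    · have hne : (((k : Int), if k < n then g k ++ [pvColVal row (k : Int)] else g k).1 == (n : Int)) = false := by
        simp only [beq_eq_false_iff_ne, ne_eq]
        simp only [Int.natCast_inj]
        omega
      have h2 : (k < n + 1) ↔ (k < n) := by omega
      simp [Function.comp, hne, h2]

theorem pvOuter (M : Nat) (rows : List (List Int)) (g : Nat → List (Int × Int)) :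
    rows.foldl (fun cd row => (PySem.List.pyRange 0 (M : Int) 1).foldl (pvStep row) cd)
        (PySem.Dict.mk ((List.range M).map (fun (k : Nat) => ((k : Int), g k))))
      = PySem.Dict.mk ((List.range M).map
          (fun (k : Nat) => ((k : Int), g k ++ rows.map (fun row => pvColVal row k)))) := by
  induction rows generalizing g with
  | nil => simp
  | cons r rs ih =>
    simp only [List.foldl_cons]
    rw [pvStep_append r M g M (le_refl M)]
    have heq : ((List.range M).map (fun (k : Nat) => ((k : Int), if k < M then g k ++ [pvColVal r k] else g k)))
        = (List.range M).map (fun (k : Nat) => ((k : Int), g k ++ [pvColVal r k])) := by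
      apply List.map_congr_left
      intro k hk
      simp only [List.mem_range] at hk
      simp [hk]
    rw [heq, ih (fun k => g k ++ [pvColVal r k])]
    simp [List.append_assoc]

theorem pvFoldlId {α β : Type} (l : List α) (d : β) : l.foldl (fun cd _ => cd) d = d := by
  induction l <;> simp_all

-- B's build over rows all long enough computes exactly the column table
theorem pvBuild_eq (M : Nat) (rows : List (List Int)) (h : ∀ r ∈ rows, M ≤ r.length) :
    pvBuild (M : Int) rows
      = (List.range M).map (fun (k : Nat) => rows.map (fun row => pvColVal row (k : Int))) := by
  induction rows with
  | nil =>
    rw [pvBuild, List.map_const', PySem.List.length_pyRange_one]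
    simp
  | cons r rs ih =>
    have hr : M ≤ r.length := h r (by simp)
    have hrs : ∀ x ∈ rs, M ≤ x.length := fun x hx => h x (by simp [hx])
    rw [pvBuild]
    rw [ih hrs]
    have hslice : PySem.List.slice r none (some (M : Int))
        = (List.range M).map (fun (k : Nat) => PySem.List.pyGetD r (k : Int) 0) := by
      rw [PySem.List.slice_to_natCast]
      apply List.ext_getElem
      · simp [hr]
      · intro i h1 h2
        have hiM : i < M := by simpa using h2
        have hilen : i < r.length := by omega
        simp [PySem.List.pyGetD_natCast, hilen]
    rw [hslice, List.zip_map', List.map_map]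
    apply List.map_congr_left
    intro k hk
    simp [Function.comp, pvColVal]

theorem pvEnum {α : Type} (g : Nat → α) (M : Nat) :
    PySem.List.enumerate ((List.range M).map g)
      = (List.range M).map (fun (k : Nat) => ((k : Int), g k)) := by
  induction M with
  | zero => rfl
  | succ n ih =>
    rw [List.range_succ, List.map_append, List.map_append,
        PySem.List.enumerate_append, ih]
    simp [PySem.List.enumerate_cons]

-- ===== VERDICT (by name: the statement is the Claim_ definition above) =====
theorem categorical_separate_class_training_spec : Claim_equal_categorical_separate_class_training := by
  intro td _ hpre
  unfold Spec_categorical_separate_class_training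
  have hA : categorical_separate_class_training td
      = ((PySem.List.pyRange 0 (td.length : Int) 1).foldl
          (fun cd i =>
            (PySem.List.pyRange 0 (((PySem.List.pyGetD td 0 []).length : Int) - 1) 1).foldl
              (pvStep (PySem.List.pyGetD td i [])) cd)
          PySem.Dict.empty).items := rfl
  rw [hA]
  have houter := PySem.List.foldl_pyRange_zero_pyGetD' td ([] : List Int)
    (fun cd row =>
      (PySem.List.pyRange 0 (((PySem.List.pyGetD td 0 []).length : Int) - 1) 1).foldl
        (pvStep row) cd)
    PySem.Dict.empty
  rw [houter]
  unfold categorical_separate_class_training_alt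
  cases td with
  | nil => rfl
  | cons first rest =>
    have hfirst : PySem.List.pyGetD (first :: rest) 0 [] = first := by
      simp [PySem.List.pyGetD_zero_cons]
    rw [hfirst]
    by_cases hm : ((first.length : Int) - 1) ≤ 0
    · have hnil : PySem.List.pyRange 0 ((first.length : Int) - 1) 1 = [] :=
        PySem.List.pyRange_one_eq_nil (by omega)
      simp only [hnil, List.foldl_nil, pvFoldlId]
      simp only [hm, if_true]
      rfl
    · have hM1 : 1 ≤ first.length := by omega
      have hMI : ((first.length : Int) - 1) = ((first.length - 1 : Nat) : Int) := by omega
      set M : Nat := first.length - 1 with hMdef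
      have hlen : ∀ r ∈ (first :: rest), M ≤ r.length := by
        intro r hr
        have h0 := hpre r hr
        have hhd : ((first :: rest).headD []).length = first.length := rfl
        rw [hhd] at h0
        omega
      rw [hMI]
      simp only [List.foldl_cons]
      have hempty : (PySem.Dict.empty : PySem.Dict Int (List (Int × Int)))
          = PySem.Dict.mk ((List.range 0).map (fun (k : Nat) => ((k : Int), [pvColVal first k]))) := rfl
      rw [pvStep_fresh first M, pvOuter M rest (fun k => [pvColVal first k])]
      rw [if_neg hm, hMI, pvBuild_eq M (first :: rest) hlen, pvEnum]
      have hitems : ∀ (l : List (Int × List (Int × Int))),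
          (l.map Prod.fst).Nodup → (PySem.Dict.ofList l).items = l := by
        intro l hnd
        have := PySem.Dict.items_foldl_insert_fresh (d := (PySem.Dict.empty : PySem.Dict Int (List (Int × Int))))
          (l := l) (k := Prod.fst) (v := Prod.snd) (by intro a _; rfl) hnd
        simpa [PySem.Dict.ofList] using this
      rw [hitems _ (by
        simp only [List.map_map]
        refine List.Nodup.map ?_ List.nodup_range
        intro a b h
        simpa using h)]
      apply List.map_congr_left
      intro k hk
      simp [pvColVal]
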